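-- pv_equiv track=rewrite | github.com/SwordfishTrumpet/torboxed | torboxed.py | normalize_search_query
-- ===== SOURCE A (Python) =====
-- import unicodedata
--
-- def normalize_search_query(query: str) -> str:
--     """Normalize search query by removing punctuation and accents.
--
--     Removes colons, hyphens, commas, and accent characters to improve
--     search matching against torrent titles that may have different formatting.
--
--     Args:
--         query: Original search query (e.g., "Spider-Man: Beyond the Spider-Verse")
--
--     Returns:
--         Normalized query (e.g., "Spider Man Beyond the Spider Verse")
--     """
--     # Remove accent characters by decomposing and removing combining marks
--     query = ''.join(
--         c for c in unicodedata.normalize('NFKD', query)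
--         if not unicodedata.combining(c)
--     )
--     # Remove specific punctuation characters
--     for char in ':,-':
--         query = query.replace(char, ' ')
--     # Replace multiple spaces with single space and strip
--     return ' '.join(query.split())
-- ===== SOURCE B (Python) =====
-- import unicodedata
--
-- def normalize_search_query(query: str) -> str:
--     """Direct tokenizer: scan the NFKD form once, treating ':', ',', '-' and
--     whitespace all as word separators; build the list of words on the fly
--     (no intermediate replaced string, no final split)."""
--     words = []
--     cur = []
--     for c in unicodedata.normalize('NFKD', query):
--         if unicodedata.combining(c):
--             continue
--         if c in ':,-' or c.isspace():
--             if cur: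
--                 words.append(''.join(cur))
--                 cur = []
--         else:
--             cur.append(c)
--     if cur:
--         words.append(''.join(cur))
--     return ' '.join(words)
-- ===== Notes on version B (the rewrite author's own statement) =====
-- stated objective: alternative
-- what changed: B replaces A's staged pipeline (combining filter, three separate replace passes, split, join) by a single-pass tokenizer that treats the three punctuation characters and whitespace uniformly as word separators and accumulates the word list directly, never materialising an intermediate replaced string.
import Mathlib
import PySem

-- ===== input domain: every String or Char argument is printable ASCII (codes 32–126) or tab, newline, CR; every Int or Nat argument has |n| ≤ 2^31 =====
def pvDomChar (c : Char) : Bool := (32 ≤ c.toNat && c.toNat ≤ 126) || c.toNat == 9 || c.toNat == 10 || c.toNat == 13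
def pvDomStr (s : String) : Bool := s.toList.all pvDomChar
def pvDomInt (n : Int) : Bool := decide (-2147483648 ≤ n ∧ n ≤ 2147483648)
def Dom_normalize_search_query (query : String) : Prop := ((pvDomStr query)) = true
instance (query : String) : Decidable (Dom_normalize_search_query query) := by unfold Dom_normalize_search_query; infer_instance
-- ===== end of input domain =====

-- Header: B replaces A's staged pipeline (combining filter, three replace passes, split,
-- join) by a single-pass tokenizer that builds the word list directly; same return value.

-- ===== PORT A =====
-- unicodedata.normalize('NFKD', .) is the identity and unicodedata.combining is 0 on the
-- ASCII domain Dom_normalize_search_query; this helper is exact exactly there.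
def pyCombiningAscii (_c : Char) : Bool := false

-- literal port of A: filter out combining chars of the NFKD form, then three
-- query.replace(char, ' ') passes (one per char of ':,-'), then ' '.join(query.split())
def normalize_search_query (query : String) : String :=
  let q0 : List Char := (query.toList).filter (fun c => !pyCombiningAscii c)
  let q1 : List Char :=
    ((":,-".toList)).foldl (fun q ch => PySem.Chars.replace q [ch] [' ']) q0
  String.ofList (PySem.Chars.join [' '] (PySem.Chars.split₀ q1))

-- ===== PORT B =====
-- literal port of B: one pass over the chars keeping (words, cur); separators are
-- ':', ',', '-' and whitespace; flush cur into words at each separator and at the end,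
-- then ' '.join(words)
def normalize_search_query_alt (query : String) : String :=
  let st :=
    (query.toList).foldl
      (fun (st : List (List Char) × List Char) c =>
        if pyCombiningAscii c then st
        else if c = ':' ∨ c = ',' ∨ c = '-' ∨ PySem.Chars.isspace c then
          (if st.2 = [] then st else (st.1 ++ [st.2], ([] : List Char)))
        else (st.1, st.2 ++ [c]))
      ([], [])
  let words := if st.2 = [] then st.1 else st.1 ++ [st.2]
  String.ofList (PySem.Chars.join [' '] words)

-- ===== PRECONDITION & SPEC =====
def Spec_normalize_search_query (query : String) (out : String) : Prop := out = normalize_search_query_alt query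
instance (query : String) (out : String) : Decidable (Spec_normalize_search_query query out) := by unfold Spec_normalize_search_query; infer_instance

-- ===== CLAIM (what is proved, stated in full; the proofs are below) =====
def Claim_equal_normalize_search_query : Prop := ∀ (query : String), Dom_normalize_search_query query → Spec_normalize_search_query query (normalize_search_query query)

-- ===== LEMMAS AND PROOFS =====

-- the whitespace-only tokenizer step (what str.split() does, phrased as a fold step)
def nsqStepW (st : List (List Char) × List Char) (c : Char) : List (List Char) × List Char :=
  if PySem.Chars.isspace c then
    (if st.2 = [] then st else (st.1 ++ [st.2], ([] : List Char)))
  else (st.1, st.2 ++ [c])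

def nsqFinish (st : List (List Char) × List Char) : List (List Char) :=
  if st.2 = [] then st.1 else st.1 ++ [st.2]

-- split₀'s worker is the tokenizer fold (go keeps cur and acc reversed)
theorem split₀_go_eq_foldl :
    ∀ (cs cur : List Char) (acc : List (List Char)),
      PySem.Chars.split₀.go cs cur acc
        = nsqFinish (cs.foldl nsqStepW (acc.reverse, cur.reverse)) := by
  intro cs
  induction cs with
  | nil =>
    intro cur acc
    by_cases h : cur = []
    · subst h; simp [PySem.Chars.split₀.go, nsqFinish]
    · simp [PySem.Chars.split₀.go, nsqFinish, List.isEmpty_iff, h,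
        List.reverse_eq_nil_iff]
  | cons c rest ih =>
    intro cur acc
    by_cases hs : PySem.Chars.isspace c = true
    · by_cases h : cur = []
      · subst h
        simp [PySem.Chars.split₀.go, hs, ih, nsqStepW]
      · simp [PySem.Chars.split₀.go, hs, List.isEmpty_iff, h, ih, nsqStepW,
          List.reverse_eq_nil_iff]
    · simp [PySem.Chars.split₀.go, hs, ih, nsqStepW]

theorem split₀_eq_tokens (cs : List Char) :
    PySem.Chars.split₀ cs = nsqFinish (cs.foldl nsqStepW ([], [])) := by
  simpa using split₀_go_eq_foldl cs [] []

-- the punctuation map A's three replaces amount to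
def nsqPunct (c : Char) : Char := if c = ':' ∨ c = ',' ∨ c = '-' then ' ' else c

-- single-char replace is a pointwise map
theorem replace_go_single (a b : Char) :
    ∀ (fuel : Nat) (l acc : List Char), l.length ≤ fuel →
      PySem.Chars.replace.go [a] [b] fuel l acc
        = acc.reverse ++ l.map (fun c => if c = a then b else c) := by
  intro fuel
  induction fuel with
  | zero =>
    intro l acc h
    have : l = [] := List.length_eq_zero_iff.mp (Nat.le_zero.mp h)
    subst this
    simp [PySem.Chars.replace.go]
  | succ n ih =>
    intro l acc h
    cases l with
    | nil => simp [PySem.Chars.replace.go]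
    | cons c t =>
      simp only [PySem.Chars.replace.go]
      by_cases hc : c = a
      · subst hc
        have hp : [c].isPrefixOf (c :: t) = true := by simp [List.isPrefixOf]
        rw [if_pos hp]
        simp only [List.length, List.drop_succ_cons, List.drop_zero]
        rw [ih t _ (by simpa using Nat.le_of_succ_le_succ h)]
        simp
      · have hp : [a].isPrefixOf (c :: t) = false := by
          simp [List.isPrefixOf, Ne.symm hc]
        rw [if_neg (by simp [hp])]
        rw [ih t _ (by simpa using Nat.le_of_succ_le_succ h)]
        simp [hc]

theorem replace_single (cs : List Char) (a b : Char) :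
    PySem.Chars.replace cs [a] [b] = cs.map (fun c => if c = a then b else c) := by
  have := replace_go_single a b cs.length cs [] (le_refl _)
  simpa [PySem.Chars.replace] using this

-- A's three replace passes are the pointwise map nsqPunct
theorem replace_chain (cs : List Char) :
    ((":,-".toList)).foldl (fun q ch => PySem.Chars.replace q [ch] [' ']) cs
      = cs.map nsqPunct := by
  have h : (":,-".toList) = [':', ',', '-'] := rfl
  rw [h]
  simp only [List.foldl, replace_single, List.map_map]
  apply List.map_congr_left
  intro c _
  unfold nsqPunct
  by_cases h1 : c = ':' <;> by_cases h2 : c = ',' <;> by_cases h3 : c = '-' <;>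
    simp_all

-- B's fused step is the whitespace tokenizer step after the punctuation map
theorem stepB_eq_stepW (st : List (List Char) × List Char) (c : Char) :
    (if pyCombiningAscii c then st
     else if c = ':' ∨ c = ',' ∨ c = '-' ∨ PySem.Chars.isspace c then
       (if st.2 = [] then st else (st.1 ++ [st.2], ([] : List Char)))
     else (st.1, st.2 ++ [c]))
      = nsqStepW st (nsqPunct c) := by
  simp only [pyCombiningAscii, Bool.false_eq_true, if_false, nsqStepW, nsqPunct]
  by_cases hp : c = ':' ∨ c = ',' ∨ c = '-'
  · rcases hp with h | h | h <;> subst h <;>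
      simp [show PySem.Chars.isspace ' ' = true from by decide]
  · by_cases hs : PySem.Chars.isspace c = true <;> simp [hp, hs]

-- the combining filter keeps everything (pyCombiningAscii is constantly false)
theorem filter_comb (cs : List Char) :
    cs.filter (fun c => !pyCombiningAscii c) = cs := by
  simp [pyCombiningAscii]

-- ===== VERDICT (by name: the statement is the Claim_ definition above) =====
theorem normalize_search_query_spec : Claim_equal_normalize_search_query := by
  intro query _
  show normalize_search_query query = normalize_search_query_alt query
  unfold normalize_search_query normalize_search_query_alt
  simp only [filter_comb, replace_chain, split₀_eq_tokens, List.foldl_map,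
    stepB_eq_stepW, nsqFinish]
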